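-- pv_equiv track=rewrite | github.com/goniborja/ikerlaria_v66 | aztarna_text/modules/syntactic.py | _skeleton_seq
-- ===== SOURCE A (Python) =====
-- def _skeleton_seq(func_seq: list[str]) -> tuple[str, str, str]:
--     """(first_constituent, V, first_complement).
--
--     first_constituent: el primer elemento de func_seq.
--     V: 'V' si aparece en func_seq, si no ''.
--     first_complement: primer DO/PP/COMP/SUB despues de V, si existe.
--     """
--     first_c = func_seq[0] if func_seq else ""
--     v = "V" if "V" in func_seq else ""
--     first_comp = ""
--     if v:
--         v_idx = func_seq.index("V")
--         for lab in func_seq[v_idx + 1:]: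
--             if lab in {"DO", "PP", "COMP", "SUB"}:
--                 first_comp = lab
--                 break
--     return (first_c, v, first_comp)
-- ===== SOURCE B (Python) =====
-- def _skeleton_seq(func_seq: list[str]) -> tuple[str, str, str]:
--     """Single forward pass: track first constituent, V presence, first complement after V."""
--     first_c = func_seq[0] if func_seq else ""
--     v = ""
--     first_comp = ""
--     for lab in func_seq:
--         if v != "V":
--             if lab == "V":
--                 v = "V"
--         elif lab in ("DO", "PP", "COMP", "SUB"):
--             first_comp = lab
--             break
--     return (first_c, v, first_comp)
-- ===== Notes on version B (the rewrite author's own statement) =====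
-- stated objective: simpler
-- what changed: Replaced the membership test + index + slice-scan decomposition by one forward pass over func_seq that flips a 'seen V' state and stops at the first complement after it.
import Mathlib
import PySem

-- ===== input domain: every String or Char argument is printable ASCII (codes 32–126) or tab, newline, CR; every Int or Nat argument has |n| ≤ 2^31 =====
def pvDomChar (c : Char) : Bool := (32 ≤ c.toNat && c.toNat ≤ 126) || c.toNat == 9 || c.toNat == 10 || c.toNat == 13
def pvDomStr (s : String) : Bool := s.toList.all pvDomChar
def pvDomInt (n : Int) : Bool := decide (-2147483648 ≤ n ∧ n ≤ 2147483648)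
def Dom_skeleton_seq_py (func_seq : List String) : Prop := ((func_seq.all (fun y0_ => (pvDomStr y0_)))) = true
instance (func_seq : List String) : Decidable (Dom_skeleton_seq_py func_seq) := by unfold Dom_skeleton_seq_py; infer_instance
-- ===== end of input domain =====

-- B replaces A's membership test + index + slice-scan by one forward pass with a 'seen V' state (simpler decomposition).


-- ===== PORT A =====
-- A's for-loop with break over func_seq[v_idx+1:]
def skeletonFindComp : List String → String
  | [] => ""
  | lab :: rest =>
    if lab = "DO" ∨ lab = "PP" ∨ lab = "COMP" ∨ lab = "SUB" then lab
    else skeletonFindComp rest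

def skeleton_seq_py (func_seq : List String) : String × String × String :=
  let first_c := match func_seq with | [] => "" | x :: _ => x
  let v := if "V" ∈ func_seq then "V" else ""
  let first_comp :=
    if v ≠ "" then
      match PySem.List.index? func_seq "V" with   -- always some here: guarded by v
      | some v_idx => skeletonFindComp (PySem.List.slice func_seq (some ((v_idx : Int) + 1)) none)
      | none => ""
    else ""
  (first_c, v, first_comp)

-- ===== PORT B =====
-- B's single loop: state v ("" until "V" seen), then first complement with break
def skeletonAltLoop : List String → String → String × String
  | [], v => (v, "")
  | lab :: rest, v =>
    if v ≠ "V" then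
      skeletonAltLoop rest (if lab = "V" then "V" else v)
    else if lab = "DO" ∨ lab = "PP" ∨ lab = "COMP" ∨ lab = "SUB" then (v, lab)
    else skeletonAltLoop rest v

def skeleton_seq_py_alt (func_seq : List String) : String × String × String :=
  let first_c := match func_seq with | [] => "" | x :: _ => x
  let vc := skeletonAltLoop func_seq ""
  (first_c, vc.1, vc.2)

-- ===== PRECONDITION & SPEC =====
def Spec_skeleton_seq_py (func_seq : List String) (out : String × String × String) : Prop := out = skeleton_seq_py_alt func_seq
instance (func_seq : List String) (out : String × String × String) : Decidable (Spec_skeleton_seq_py func_seq out) := by unfold Spec_skeleton_seq_py; infer_instance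

-- ===== CLAIM (what is proved, stated in full; the proofs are below) =====
def Claim_equal_skeleton_seq_py : Prop := ∀ (func_seq : List String), Dom_skeleton_seq_py func_seq → Spec_skeleton_seq_py func_seq (skeleton_seq_py func_seq)

-- ===== LEMMAS AND PROOFS =====

theorem altLoop_no_v (fs : List String) (h : "V" ∉ fs) : skeletonAltLoop fs "" = ("", "") := by
  induction fs with
  | nil => rfl
  | cons lab rest ih =>
    have hlab : lab ≠ "V" := fun he => h (he ▸ List.mem_cons_self)
    have hrest : "V" ∉ rest := fun hm => h (List.mem_cons_of_mem _ hm)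
    simp [skeletonAltLoop, hlab, ih hrest]

theorem altLoop_after_v (fs : List String) : skeletonAltLoop fs "V" = ("V", skeletonFindComp fs) := by
  induction fs with
  | nil => rfl
  | cons lab rest ih =>
    by_cases hc : lab = "DO" ∨ lab = "PP" ∨ lab = "COMP" ∨ lab = "SUB" <;>
      simp [skeletonAltLoop, skeletonFindComp, hc, ih]

theorem altLoop_index (fs : List String) (i : Nat)
    (h : PySem.List.index? fs "V" = some i) :
    skeletonAltLoop fs "" = ("V", skeletonFindComp (fs.drop (i + 1))) := by
  induction fs generalizing i with
  | nil => simp [PySem.List.index?_eq_idxOf?, List.idxOf?] at h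
  | cons lab rest ih =>
    by_cases hlab : lab = "V"
    · subst hlab
      rw [PySem.List.index?_cons_self] at h
      cases h
      simp [skeletonAltLoop, altLoop_after_v]
    · rw [PySem.List.index?_cons_of_ne rest hlab] at h
      cases hj : PySem.List.index? rest "V" with
      | none => rw [hj] at h; simp at h
      | some j =>
        rw [hj] at h
        simp at h
        subst h
        simpa [skeletonAltLoop, hlab] using ih j hj

-- ===== VERDICT (by name: the statement is the Claim_ definition above) =====
theorem skeleton_seq_py_spec : Claim_equal_skeleton_seq_py := by
  intro fs _
  unfold Spec_skeleton_seq_py skeleton_seq_py skeleton_seq_py_alt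
  by_cases hv : "V" ∈ fs
  · have hs : (PySem.List.index? fs "V").isSome := (PySem.List.index?_isSome_iff fs "V").mpr hv
    obtain ⟨i, hi⟩ := Option.isSome_iff_exists.mp hs
    have hslice : PySem.List.slice fs (some ((i : Int) + 1)) none = fs.drop (i + 1) := by
      have : ((i : Int) + 1) = ((i + 1 : Nat) : Int) := by push_cast; ring
      rw [this, PySem.List.slice_from_natCast]
    rw [PySem.List.index?_eq_idxOf?] at hi
    simp [hv, hi, hslice, altLoop_index fs i, PySem.List.index?_eq_idxOf?]
  · simp [hv, altLoop_no_v fs hv]
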